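-- pv_equiv track=rewrite | github.com/truongducanh/Pythondemo1 | demo3.py | fortuneTeller
-- ===== SOURCE A (Python) =====
-- def fortuneTeller(name1,name2):
--     name1 = name1.lower()
--     name2 = name2.lower()
--     count = 0
--     for charac in range(ord('a'), ord('z') +1):
--         #print (chr(alphabet))
--         # name similarity checking
--         # In python: (character 'in' string) to check if that character in the string
--         if (chr(charac) in name1) and (chr(charac) in name2):
--             count = count+1
--
--
--     if count == 0 :
--         result = "strangers"
--     elif 0<count<3:
--         result = "friends"
--     else:
--         result =  "matched"
--
--     return result
-- ===== SOURCE B (Python) =====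
-- def fortuneTeller(name1, name2):
--     shared = {c for c in name1.lower() if 'a' <= c <= 'z'} & set(name2.lower())
--     count = len(shared)
--     if count == 0:
--         return "strangers"
--     elif count < 3:
--         return "friends"
--     else:
--         return "matched"
-- ===== Notes on version B (the rewrite author's own statement) =====
-- stated objective: simpler
-- what changed: Replaces A's explicit 26-iteration alphabet loop with direct set algebra: the shared letters are computed as the set of a-z characters of name1.lower() intersected with set(name2.lower()), and count is its size; the classification cascade is unchanged.
import Mathlib
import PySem

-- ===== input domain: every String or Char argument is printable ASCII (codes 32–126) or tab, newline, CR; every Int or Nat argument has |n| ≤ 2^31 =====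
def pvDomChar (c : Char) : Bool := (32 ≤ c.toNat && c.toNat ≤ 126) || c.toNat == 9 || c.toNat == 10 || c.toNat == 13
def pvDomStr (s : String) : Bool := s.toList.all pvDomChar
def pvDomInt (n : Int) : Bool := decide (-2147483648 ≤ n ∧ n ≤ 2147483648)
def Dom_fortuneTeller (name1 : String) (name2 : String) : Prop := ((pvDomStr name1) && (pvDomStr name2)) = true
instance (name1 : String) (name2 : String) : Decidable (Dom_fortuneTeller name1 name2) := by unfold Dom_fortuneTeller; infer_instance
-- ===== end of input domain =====

-- B replaces A's 26-iteration alphabet scan by building the set of shared lowercase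
-- letters directly with set algebra (objective: simpler); same classification cascade.

-- ===== PORT A =====
-- chr(i); exact for the code points 97..122 this program passes it
def pvChr (i : Int) : Char := Char.ofNat i.toNat

def fortuneTeller (name1 : String) (name2 : String) : String :=
  let n1 := PySem.Str.lower name1
  let n2 := PySem.Str.lower name2
  let count : Int := (PySem.List.pyRange 97 (122 + 1) 1).foldl
    (fun count charac =>
      if PySem.Str.isIn (String.ofList [pvChr charac]) n1
          && PySem.Str.isIn (String.ofList [pvChr charac]) n2
      then count + 1 else count) 0
  if count = 0 then "strangers"
  else if 0 < count ∧ count < 3 then "friends"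
  else "matched"

-- ===== PORT B =====
def fortuneTeller_alt (name1 : String) (name2 : String) : String :=
  let shared : PySem.Set Char :=
    PySem.Set.inter
      (PySem.Set.ofList (((PySem.Str.lower name1).toList).filter (fun c => 'a' ≤ c && c ≤ 'z')))
      (PySem.Set.ofList ((PySem.Str.lower name2).toList))
  let count : Int := PySem.Set.len shared
  if count = 0 then "strangers"
  else if count < 3 then "friends"
  else "matched"

-- ===== PRECONDITION & SPEC =====
def Spec_fortuneTeller (name1 : String) (name2 : String) (out : String) : Prop := out = fortuneTeller_alt name1 name2
instance (name1 : String) (name2 : String) (out : String) : Decidable (Spec_fortuneTeller name1 name2 out) := by unfold Spec_fortuneTeller; infer_instance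

-- ===== CLAIM (what is proved, stated in full; the proofs are below) =====
def Claim_equal_fortuneTeller : Prop := ∀ (name1 : String) (name2 : String), Dom_fortuneTeller name1 name2 → Spec_fortuneTeller name1 name2 (fortuneTeller name1 name2)

-- ===== LEMMAS AND PROOFS =====

theorem singleton_infix_iff (c : Char) (l : List Char) : [c] <:+: l ↔ c ∈ l := by
  constructor
  · intro h; exact h.subset (List.mem_singleton_self c)
  · intro h
    obtain ⟨s, t, rfl⟩ := List.append_of_mem h
    exact ⟨s, t, by simp⟩

theorem isIn_single_iff (c : Char) (s : String) :
    PySem.Str.isIn (String.ofList [c]) s = true ↔ c ∈ s.toList := by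
  rw [PySem.Str.isIn_iff_infix]
  have h : (String.ofList [c]).toList = [c] := by simp
  rw [h, singleton_infix_iff]

theorem char_le_iff (c : Char) : ('a' ≤ c && c ≤ 'z') = true ↔ 97 ≤ c.toNat ∧ c.toNat ≤ 122 := by
  simp only [Bool.and_eq_true, decide_eq_true_eq, Char.le_def, UInt32.le_iff_toNat_le]
  constructor <;> (intro h; exact ⟨h.1, h.2⟩)

theorem toNat_pvChr {i : Int} (h1 : 97 ≤ i) (h2 : i < 123) : (pvChr i).toNat = i.toNat := by
  unfold pvChr
  rw [Char.toNat_ofNat, if_pos]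
  left
  omega

theorem pvChr_toNat_self (c : Char) : pvChr (c.toNat : Int) = c := by
  unfold pvChr
  simp only [Int.toNat_natCast]
  exact Char.ofNat_toNat c

theorem count_eq (s1 s2 : String) :
    (PySem.List.pyRange 97 (122 + 1) 1).foldl
      (fun count charac =>
        if PySem.Str.isIn (String.ofList [pvChr charac]) s1
            && PySem.Str.isIn (String.ofList [pvChr charac]) s2
        then count + 1 else count) 0
    = PySem.Set.len
        (PySem.Set.inter
          (PySem.Set.ofList (s1.toList.filter (fun c => 'a' ≤ c && c ≤ 'z')))
          (PySem.Set.ofList s2.toList)) := by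
  set p : Int → Bool := fun charac =>
    PySem.Str.isIn (String.ofList [pvChr charac]) s1
      && PySem.Str.isIn (String.ofList [pvChr charac]) s2 with hp
  set shared : PySem.Set Char :=
    PySem.Set.inter
      (PySem.Set.ofList (s1.toList.filter (fun c => 'a' ≤ c && c ≤ 'z')))
      (PySem.Set.ofList s2.toList) with hsh
  rw [PySem.List.foldl_count_if p _ 0, List.countP_eq_length_filter]
  set listA := (PySem.List.pyRange 97 (122 + 1) 1).filter p with hla
  -- members of listA lie in [97, 123)
  have hbound : ∀ i ∈ listA, 97 ≤ i ∧ i < 123 := by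
    intro i hi
    have := (List.mem_filter.mp hi).1
    exact PySem.List.mem_pyRange_one.mp this
  -- the mapped list is nodup
  have hnd1 : (listA.map pvChr).Nodup := by
    apply List.Nodup.map_on
    · intro x hx y hy hxy
      obtain ⟨hx1, hx2⟩ := hbound x hx
      obtain ⟨hy1, hy2⟩ := hbound y hy
      have := congrArg Char.toNat hxy
      rw [toNat_pvChr hx1 hx2, toNat_pvChr hy1 hy2] at this
      omega
    · exact List.Nodup.filter _ (PySem.List.nodup_pyRange_one 97 (122 + 1))
  have hnd2 : shared.Nodup :=
    PySem.Set.nodup_inter _ _ (PySem.Set.nodup_ofList _)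
  -- same membership
  have hmem : ∀ c : Char, c ∈ listA.map pvChr ↔ c ∈ shared := by
    intro c
    rw [hsh, PySem.Set.mem_inter, PySem.Set.mem_ofList, PySem.Set.mem_ofList,
        List.mem_filter]
    constructor
    · rintro hcm
      obtain ⟨i, hi, rfl⟩ := List.mem_map.mp hcm
      obtain ⟨hi1, hi2⟩ := hbound i hi
      have hpi := (List.mem_filter.mp hi).2
      rw [hp] at hpi
      have h1 := (Bool.and_eq_true _ _).mp hpi
      refine ⟨⟨(isIn_single_iff _ _).mp h1.1, ?_⟩, (isIn_single_iff _ _).mp h1.2⟩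
      rw [char_le_iff, toNat_pvChr hi1 hi2]
      omega
    · rintro ⟨⟨hc1, hcl⟩, hc2⟩
      obtain ⟨h97, h122⟩ := (char_le_iff c).mp hcl
      refine List.mem_map.mpr ⟨(c.toNat : Int), ?_, pvChr_toNat_self c⟩
      rw [hla, List.mem_filter]
      constructor
      · rw [PySem.List.mem_pyRange_one]; omega
      · rw [hp]
        apply (Bool.and_eq_true _ _).mpr
        rw [pvChr_toNat_self c]
        exact ⟨(isIn_single_iff _ _).mpr hc1, (isIn_single_iff _ _).mpr hc2⟩
  have hperm : (listA.map pvChr).Perm shared :=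
    (List.perm_ext_iff_of_nodup hnd1 hnd2).mpr hmem
  have hlen : listA.length = shared.length := by
    have := hperm.length_eq
    rwa [List.length_map] at this
  show (0 : Int) + (listA.length : Int) = PySem.Set.len shared
  rw [hlen]
  simp [PySem.Set.len]

theorem classify_eq (n : Int) (hnon : 0 ≤ n) :
    (if n = 0 then "strangers" else if 0 < n ∧ n < 3 then "friends" else "matched")
    = (if n = 0 then "strangers" else if n < 3 then "friends" else "matched") := by
  split_ifs <;> first | rfl | omega

-- ===== VERDICT (by name: the statement is the Claim_ definition above) =====
theorem fortuneTeller_spec : Claim_equal_fortuneTeller := by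
  intro name1 name2 _
  show fortuneTeller name1 name2 = fortuneTeller_alt name1 name2
  unfold fortuneTeller fortuneTeller_alt
  simp only [count_eq]
  exact classify_eq _ (by simp [PySem.Set.len])
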